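-- pv_equiv track=rewrite | github.com/mohamedaaris/Resumatch | visual_resume_analyzer.py | _find_position_clusters
-- ===== SOURCE A (Python) =====
-- from typing import Dict, List, Tuple, Any, Optional
--
-- def _find_position_clusters(positions: List[int]) -> List[List[int]]:
--     """Find clusters of similar positions"""
--     if not positions:
--         return []
--
--     positions.sort()
--     clusters = []
--     current_cluster = [positions[0]]
--
--     for pos in positions[1:]:
--         if pos - current_cluster[-1] <= 30:  # Tolerance
--             current_cluster.append(pos)
--         else:
--             clusters.append(current_cluster)
--             current_cluster = [pos]
--
--     clusters.append(current_cluster)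
--     return [cluster for cluster in clusters if len(cluster) >= 2]
-- ===== SOURCE B (Python) =====
-- def _find_position_clusters(positions):
--     """Find clusters of similar positions by computing split boundaries, then slicing.
--
--     Sorts `positions` in place (like the original). Stage 1: collect the cut
--     indices where the gap between consecutive sorted elements exceeds 30.
--     Stage 2: slice the sorted list at those cut points, keeping only slices
--     spanning at least two elements.
--     """
--     positions.sort()
--     n = len(positions)
--     cuts = [0] + [i for i, (x, y) in enumerate(zip(positions, positions[1:]), 1) if y - x > 30] + [n]
--     return [positions[a:b] for a, b in zip(cuts, cuts[1:]) if b - a >= 2]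
-- ===== Notes on version B (the rewrite author's own statement) =====
-- stated objective: alternative
-- what changed: B replaces A's single forward pass with a current-cluster accumulator by two staged passes: first compute the list of cut indices (enumerate+zip where the consecutive gap exceeds 30), then slice the sorted list at those cut points and keep slices of length >= 2; no cluster is ever built element by element.
import Mathlib
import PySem

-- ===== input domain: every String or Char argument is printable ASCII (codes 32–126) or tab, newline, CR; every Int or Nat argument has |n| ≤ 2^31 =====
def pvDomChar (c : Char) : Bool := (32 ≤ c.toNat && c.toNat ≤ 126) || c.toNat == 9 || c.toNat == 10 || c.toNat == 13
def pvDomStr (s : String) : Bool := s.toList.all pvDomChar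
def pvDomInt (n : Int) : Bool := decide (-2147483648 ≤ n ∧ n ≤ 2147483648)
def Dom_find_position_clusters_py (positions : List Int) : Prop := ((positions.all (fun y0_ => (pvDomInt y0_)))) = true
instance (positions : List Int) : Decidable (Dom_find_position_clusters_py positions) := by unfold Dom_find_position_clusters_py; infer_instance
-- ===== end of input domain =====

-- B computes clusters in two staged passes (collect cut indices where the consecutive gap
-- exceeds 30, then slice the sorted list at those cuts), instead of A's single forward pass
-- with a current-cluster accumulator; same return value. Both A and B sort the argument in
-- place in Python; the equivalence proved here is about the return value.


-- ===== PORT A =====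
-- loop body of A: current_cluster[-1] is ported as pyGetD st.2 (-1) 0, exact because
-- current_cluster is never empty at that point in A.
def pvStepA (st : List (List Int) × List Int) (pos : Int) : List (List Int) × List Int :=
  if pos - (PySem.List.pyGetD st.2 (-1) 0) ≤ 30 then (st.1, st.2 ++ [pos])
  else (st.1 ++ [st.2], [pos])

-- positions[0] ported as pyGetD s 0 0, exact because positions is nonempty on that branch.
def find_position_clusters_py (positions : List Int) : List (List Int) :=
  if positions = [] then []
  else
    let s := PySem.List.sorted positions (fun x => x) false
    let st := (PySem.List.slice s (some 1) none).foldl pvStepA ([], [PySem.List.pyGetD s 0 0])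
    (st.1 ++ [st.2]).filter (fun c => decide (2 ≤ c.length))

-- ===== PORT B =====
def find_position_clusters_py_alt (positions : List Int) : List (List Int) :=
  let s := PySem.List.sorted positions (fun x => x) false
  let n : Int := s.length
  let cuts : List Int :=
    0 :: ((PySem.List.enumerate (s.zip (PySem.List.slice s (some 1) none)) 1).filter
            (fun p => decide (p.2.2 - p.2.1 > 30))).map Prod.fst ++ [n]
  ((cuts.zip (PySem.List.slice cuts (some 1) none)).filter
      (fun p => decide (2 ≤ p.2 - p.1))).map
    (fun p => PySem.List.slice s (some p.1) (some p.2))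

-- ===== PRECONDITION & SPEC =====
def Spec_find_position_clusters_py (positions : List Int) (out : List (List Int)) : Prop := out = find_position_clusters_py_alt positions
instance (positions : List Int) (out : List (List Int)) : Decidable (Spec_find_position_clusters_py positions out) := by unfold Spec_find_position_clusters_py; infer_instance

-- ===== CLAIM (what is proved, stated in full; the proofs are below) =====
def Claim_equal_find_position_clusters_py : Prop := ∀ (positions : List Int), Dom_find_position_clusters_py positions → Spec_find_position_clusters_py positions (find_position_clusters_py positions)

-- ===== LEMMAS AND PROOFS =====

-- canonical grouping of a :: rest into maximal runs with consecutive gap ≤ 30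
def grp : Int → List Int → List (List Int)
  | a, [] => [[a]]
  | a, b :: rest =>
    if b - a ≤ 30 then
      match grp b rest with
      | g :: gs => (a :: g) :: gs
      | [] => [[a]]
    else [a] :: grp b rest

theorem grp_shape (rest : List Int) (a : Int) : ∃ g gs, grp a rest = (a :: g) :: gs := by
  induction rest generalizing a with
  | nil => exact ⟨[], [], rfl⟩
  | cons b rest ih =>
    obtain ⟨g, gs, hg⟩ := ih b
    by_cases h : b - a ≤ 30
    · exact ⟨b :: g, gs, by simp [grp, h, hg]⟩
    · exact ⟨[], (b :: g) :: gs, by simp [grp, h, hg]⟩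

theorem grp_flatten (rest : List Int) (a : Int) : (grp a rest).flatten = a :: rest := by
  induction rest generalizing a with
  | nil => rfl
  | cons b rest ih =>
    obtain ⟨g, gs, hg⟩ := grp_shape rest b
    by_cases h : b - a ≤ 30 <;>
      simpa [grp, h, hg] using (by simpa [hg] using ih b)

theorem foldlA_grp (rest : List Int) (clusters : List (List Int)) (cur : List Int) (a : Int)
    (h : cur ≠ []) (ha : cur.getLast h = a) (g : List Int) (gs : List (List Int))
    (hg : grp a rest = (a :: g) :: gs) :
    (rest.foldl pvStepA (clusters, cur)).1 ++ [(rest.foldl pvStepA (clusters, cur)).2]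
      = clusters ++ (cur ++ g) :: gs := by
  induction rest generalizing clusters cur a g gs with
  | nil =>
    simp only [grp] at hg
    obtain ⟨rfl, rfl⟩ : g = [] ∧ gs = [] := by
      cases hg; exact ⟨rfl, rfl⟩
    simp
  | cons b rest ih =>
    obtain ⟨g', gs', hg'⟩ := grp_shape rest b
    have hlast : PySem.List.pyGetD cur (-1) 0 = a := by
      rw [PySem.List.pyGetD_neg_one (xs := cur) (h := h)]; exact ha
    by_cases hle : b - a ≤ 30
    · simp only [grp, if_pos hle, hg'] at hg
      obtain ⟨rfl, rfl⟩ : (b :: g') = g ∧ gs' = gs := by cases hg; exact ⟨rfl, rfl⟩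
      have hstep : pvStepA (clusters, cur) b = (clusters, cur ++ [b]) := by
        simp [pvStepA, hlast, hle]
      rw [List.foldl_cons, hstep,
        ih clusters (cur ++ [b]) b (by simp) (by simp) g' gs' hg']
      simp
    · simp only [grp, if_neg hle, hg'] at hg
      obtain ⟨rfl, rfl⟩ : ([] : List Int) = g ∧ (b :: g') :: gs' = gs := by
        cases hg; exact ⟨rfl, rfl⟩
      have hstep : pvStepA (clusters, cur) b = (clusters ++ [cur], [b]) := by
        simp [pvStepA, hlast, hle]
      rw [List.foldl_cons, hstep,
        ih (clusters ++ [cur]) [b] b (by simp) (by simp) g' gs' hg']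
      simp

-- the cut points of a partition: offset, then each cumulative length
def cutlist (k : Nat) : List (List Int) → List Int
  | [] => [(k : Int)]
  | g :: gs => (k : Int) :: cutlist (k + g.length) gs

theorem cutlist_shape (gs : List (List Int)) (k : Nat) :
    ∃ r, cutlist k gs = (k : Int) :: r := by
  cases gs <;> exact ⟨_, rfl⟩

-- B's stage 1 (boundary indices, plus the final n) computes the cut points of grp
theorem boundaries_cutlist (t : List Int) (a : Int) (k : Nat) :
    ((PySem.List.enumerate ((a :: t).zip t) ((k : Int) + 1)).filter
        (fun p => decide (p.2.2 - p.2.1 > 30))).map Prod.fst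
      ++ [((k + (a :: t).length : Nat) : Int)]
      = (cutlist k (grp a t)).tail := by
  induction t generalizing a k with
  | nil => simp [grp, cutlist]
  | cons b rest ih =>
    obtain ⟨g, gs, hg⟩ := grp_shape rest b
    have hz : (a :: b :: rest).zip (b :: rest) = (a, b) :: (b :: rest).zip rest := rfl
    have hcast : ((k : Int) + 1) + 1 = ((k + 1 : Nat) : Int) + 1 := by push_cast; ring
    by_cases h : b - a ≤ 30
    · -- no cut at index k+1; first group of grp a (b::rest) absorbs a
      have hga : grp a (b :: rest) = (a :: b :: g) :: gs := by simp [grp, h, hg]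
      have := ih b (k + 1)
      rw [hg] at this
      have hlen : ((k + (a :: b :: rest).length : Nat) : Int)
          = (((k + 1) + (b :: rest).length : Nat) : Int) := by push_cast [List.length_cons]; ring
      rw [hz, PySem.List.enumerate_cons, List.filter_cons]
      have hcond : ¬ ((a, b).2 - (a, b).1 > 30) := by simpa using h
      simp only [hcond, decide_false, if_neg, Bool.false_eq_true, not_false_iff]
      rw [hcast, hlen, this, hga]
      show cutlist ((k + 1) + (b :: g).length) gs = (cutlist k ((a :: b :: g) :: gs)).tail
      have : (k + 1) + (b :: g).length = k + (a :: b :: g).length := by simp; omega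
      rw [this]; rfl
    · -- a cut at index k+1; grp starts a new group
      have hga : grp a (b :: rest) = [a] :: (b :: g) :: gs := by simp [grp, h, hg]
      have := ih b (k + 1)
      rw [hg] at this
      have hlen : ((k + (a :: b :: rest).length : Nat) : Int)
          = (((k + 1) + (b :: rest).length : Nat) : Int) := by push_cast [List.length_cons]; ring
      rw [hz, PySem.List.enumerate_cons, List.filter_cons]
      have hcond : ((a, b).2 - (a, b).1 > 30) := by show b - a > 30; omega
      simp only [hcond, decide_true, if_pos, List.map_cons, List.cons_append]
      rw [hcast, hlen, this, hga]
      show ((k : Int) + 1) :: (cutlist (k + 1) ((b :: g) :: gs)).tail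
          = (cutlist k ([a] :: (b :: g) :: gs)).tail
      have h1 : k + [a].length = k + 1 := by simp
      show ((k : Int) + 1) :: (cutlist (k + 1) ((b :: g) :: gs)).tail
          = cutlist (k + [a].length) ((b :: g) :: gs)
      rw [h1]
      show ((k : Int) + 1) :: cutlist ((k + 1) + (b :: g).length) gs
          = ((k + 1 : Nat) : Int) :: cutlist ((k + 1) + (b :: g).length) gs
      push_cast; rfl

-- B's stage 2: slicing at the cut points of a partition, keeping spans ≥ 2,
-- recovers the groups of length ≥ 2
theorem slices_of_cutlist (gs : List (List Int)) (s : List Int) (k : Nat)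
    (hs : s.drop k = gs.flatten) :
    (((cutlist k gs).zip (PySem.List.slice (cutlist k gs) (some 1) none)).filter
        (fun p => decide (2 ≤ p.2 - p.1))).map
      (fun p => PySem.List.slice s (some p.1) (some p.2))
      = gs.filter (fun g => decide (2 ≤ g.length)) := by
  induction gs generalizing k with
  | nil => simp [cutlist, PySem.List.slice_from_one]
  | cons g gs ih =>
    obtain ⟨r, hr⟩ := cutlist_shape gs (k + g.length)
    have hdrop : s.drop (k + g.length) = gs.flatten := by
      have h' := congrArg (List.drop g.length) hs
      rw [List.drop_drop, List.flatten_cons, List.drop_left] at h'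
      exact h'
    have hsl : PySem.List.slice s (some (k : Int)) (some ((k + g.length : Nat) : Int)) = g := by
      have : ((k + g.length : Nat) : Int) = (k : Int) + (g.length : Int) := by push_cast; ring
      rw [this, PySem.List.slice_natCast_add, hs]
      simp
    have hcond : (decide (2 ≤ ((k + g.length : Nat) : Int) - (k : Int)))
        = decide (2 ≤ g.length) := by
      by_cases h2 : 2 ≤ g.length <;> simp [h2]
    have hIH := ih (k + g.length) hdrop
    rw [PySem.List.slice_from_one, hr, List.tail_cons] at hIH
    have hcast : ((k + g.length : Nat) : Int) = (k : Int) + (g.length : Int) := by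
      push_cast; ring
    rw [hcast] at hsl hIH
    rw [show cutlist k (g :: gs) = (k : Int) :: cutlist (k + g.length) gs from rfl,
      PySem.List.slice_from_one, List.tail_cons, hr, List.zip_cons_cons, List.filter_cons,
      hcond]
    by_cases h2 : 2 ≤ g.length
    · simp [h2, hsl, hIH]
    · simp [h2, hIH]

-- ===== VERDICT (by name: the statement is the Claim_ definition above) =====
theorem find_position_clusters_py_spec : Claim_equal_find_position_clusters_py := by
  intro positions _
  show find_position_clusters_py positions = find_position_clusters_py_alt positions
  by_cases hp : positions = []
  · subst hp; rfl
  · have hs : PySem.List.sorted positions (fun x => x) false ≠ [] := by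
      simpa [PySem.List.sorted_eq_nil_iff] using hp
    obtain ⟨a, t, hst⟩ := List.exists_cons_of_ne_nil hs
    obtain ⟨g, gs, hg⟩ := grp_shape t a
    unfold find_position_clusters_py find_position_clusters_py_alt
    rw [if_neg hp]
    simp only [hst]
    have h0 : PySem.List.pyGetD (a :: t) 0 0 = a := by
      simp [PySem.List.pyGetD_zero]
    have h1 : PySem.List.slice (a :: t) (some 1) none = t := by
      rw [PySem.List.slice_from_one]; rfl
    -- A's side = filtered grp
    rw [h0, h1, foldlA_grp t [] [a] a (by simp) (by simp) g gs hg]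
    -- B's side = filtered grp
    have hb := boundaries_cutlist t a 0
    have hone : ((0 : Nat) : Int) + 1 = (1 : Int) := by norm_num
    rw [hone] at hb
    have hcuts : (0 : Int)
          :: ((PySem.List.enumerate ((a :: t).zip t) 1).filter
              (fun p => decide (p.2.2 - p.2.1 > 30))).map Prod.fst
          ++ [((a :: t).length : Int)] = cutlist 0 (grp a t) := by
      obtain ⟨r, hr⟩ := cutlist_shape (grp a t) 0
      rw [hr]
      rw [hr, List.tail_cons] at hb
      simpa using hb
    rw [hcuts, slices_of_cutlist (grp a t) (a :: t) 0 (by simpa using (grp_flatten t a).symm), hg]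
    simp
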